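-- pv_equiv track=rewrite | github.com/eli-fidele/mistyPy | Misty/scales.py | fifths_circle
-- ===== SOURCE A (Python) =====
-- Chromatic = {0:'C',1:'C#',2:'D',3:'D#',4:'E',5:'F',6:'F#',7:'G',8:'G#',9:'A',10:'A#',11:'B'}
--
-- def fifths_circle(root):
--     # Transpose a Chromatic scale to a given root
--     CHROM = transpose_notes(Chromatic, root)
--     # Create a circle of fifths given a same-root Chromatic scale
--     circle = {}
--     i = 0
--     while i < 12:
--         curr = (7*i)%12
--         circle[i] = CHROM[curr]
--         i += 1
--     return circle
--
-- def transpose_notes(notes, k):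
--     transposed = {}
--     i = 0
--     while i < 12:
--         # Transposes a 12-note scale using modular arithmetic of list indexing
--         transposed[i] = notes[(i+k)%12]
--         i += 1
--     return transposed
-- ===== SOURCE B (Python) =====
-- Chromatic = {0:'C',1:'C#',2:'D',3:'D#',4:'E',5:'F',6:'F#',7:'G',8:'G#',9:'A',10:'A#',11:'B'}
--
-- def fifths_circle(root):
--     # Circle of fifths by striding: repeat the chromatic name list and take
--     # every 7th name starting at root % 12 -- a slice does all the index
--     # arithmetic, no per-element modular arithmetic and no dict lookups.
--     names = list(Chromatic.values())
--     wheel = (names * 8)[root % 12::7]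
--     return dict(enumerate(wheel[:12]))
-- ===== Notes on version B (the rewrite author's own statement) =====
-- stated objective: alternative
-- what changed: Instead of A's per-index modular arithmetic with an intermediate transposed dict, B repeats the chromatic name list and takes a stride-seven slice starting at the root reduced modulo the scale length, then numbers the resulting names with enumerate; the only arithmetic is one mod at the start.
import Mathlib
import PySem

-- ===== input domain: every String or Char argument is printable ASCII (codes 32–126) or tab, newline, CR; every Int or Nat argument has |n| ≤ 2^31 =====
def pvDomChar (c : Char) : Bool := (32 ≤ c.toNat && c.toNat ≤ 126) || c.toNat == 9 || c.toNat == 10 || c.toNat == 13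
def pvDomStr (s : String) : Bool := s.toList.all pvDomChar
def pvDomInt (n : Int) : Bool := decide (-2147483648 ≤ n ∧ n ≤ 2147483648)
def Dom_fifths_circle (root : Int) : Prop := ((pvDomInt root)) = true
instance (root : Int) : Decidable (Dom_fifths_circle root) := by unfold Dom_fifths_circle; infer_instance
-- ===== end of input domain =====

-- B replaces A's transpose-table + per-index mod arithmetic by a stride-7 slice over a repeated name list (alternative decomposition); same return values.


-- ===== PORT A =====
-- module-level constant dict
def Chromatic : PySem.Dict Int String :=
  PySem.Dict.ofList [(0,"C"),(1,"C#"),(2,"D"),(3,"D#"),(4,"E"),(5,"F"),(6,"F#"),(7,"G"),(8,"G#"),(9,"A"),(10,"A#"),(11,"B")]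

-- notes[(i+k)%12]: dict lookup; the key (i+k)%12 is always in 0..11, a key of Chromatic,
-- so the KeyError branch (get? = none) is unreachable; .getD "" is exact here.
def transpose_notes (notes : PySem.Dict Int String) (k : Int) : PySem.Dict Int String :=
  (PySem.List.pyRange 0 12 1).foldl
    (fun transposed i => transposed.insert i ((notes.get? (PySem.Int.mod (i + k) 12)).getD ""))
    PySem.Dict.empty

def fifths_circle (root : Int) : List (Int × String) :=
  let CHROM := transpose_notes Chromatic root
  ((PySem.List.pyRange 0 12 1).foldl
    (fun circle i =>
      let curr := PySem.Int.mod (7 * i) 12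
      circle.insert i ((CHROM.get? curr).getD ""))
    PySem.Dict.empty).items

-- ===== PORT B =====
-- names * 8 is ported as the flattened 8-fold replication; the stride-7 slice
-- (names*8)[root%12::7] is PySem.List.slice? with step 7 (step ≠ 0, so .getD [] is exact).
def fifths_circle_alt (root : Int) : List (Int × String) :=
  let names := Chromatic.values
  let wheel := (PySem.List.slice? ((List.replicate 8 names).flatten)
                  (some (PySem.Int.mod root 12)) none 7).getD []
  (PySem.Dict.ofList (PySem.List.enumerate (wheel.take 12))).items

-- ===== PRECONDITION & SPEC =====
def Spec_fifths_circle (root : Int) (out : List (Int × String)) : Prop := out = fifths_circle_alt root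
instance (root : Int) (out : List (Int × String)) : Decidable (Spec_fifths_circle root out) := by unfold Spec_fifths_circle; infer_instance

-- ===== CLAIM (what is proved, stated in full; the proofs are below) =====
def Claim_equal_fifths_circle : Prop := ∀ (root : Int), Dom_fifths_circle root → Spec_fifths_circle root (fifths_circle root)

-- ===== LEMMAS AND PROOFS =====

-- both programs depend on root only through root % 12
theorem pv_mod_shift (root a : Int) :
    PySem.Int.mod (a + root) 12 = PySem.Int.mod (a + PySem.Int.mod root 12) 12 := by
  rw [PySem.Int.mod_eq_emod_of_pos (by norm_num), PySem.Int.mod_eq_emod_of_pos (by norm_num),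
    PySem.Int.mod_eq_emod_of_pos (by norm_num)]
  omega

theorem pv_A_mod (root : Int) :
    fifths_circle root = fifths_circle (PySem.Int.mod root 12) := by
  have h : transpose_notes Chromatic root = transpose_notes Chromatic (PySem.Int.mod root 12) := by
    simp only [transpose_notes, pv_mod_shift root]
  simp only [fifths_circle, h]

theorem pv_B_mod (root : Int) :
    fifths_circle_alt root = fifths_circle_alt (PySem.Int.mod root 12) := by
  have h : PySem.Int.mod (PySem.Int.mod root 12) 12 = PySem.Int.mod root 12 := by
    rw [PySem.Int.mod_eq_emod_of_pos (by norm_num), PySem.Int.mod_eq_emod_of_pos (by norm_num)]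
    omega
  simp only [fifths_circle_alt, h]

theorem pv_eq_small : ∀ (r : Int), 0 ≤ r → r < 12 → fifths_circle r = fifths_circle_alt r := by
  intro r h0 h1
  interval_cases r <;> decide

-- ===== VERDICT (by name: the statement is the Claim_ definition above) =====
theorem fifths_circle_spec : Claim_equal_fifths_circle := by
  intro root _
  unfold Spec_fifths_circle
  rw [pv_A_mod, pv_B_mod]
  exact pv_eq_small _ (PySem.Int.mod_nonneg root (by norm_num)) (PySem.Int.mod_lt root (by norm_num))
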